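-- pv_equiv track=rewrite | github.com/CathyAn01/intention_noise | notebook.py | count_certain_number_in_list
-- ===== SOURCE A (Python) =====
-- def count_certain_number_in_list(list_to_manipulate, certain_number):
--     count = 0
--     index_list=[]
--     for i in range(len(list_to_manipulate)):
--         if certain_number == list_to_manipulate[i]:
--             count = count + 1
--             index_list.append(i)
--
--     return count,index_list
-- ===== SOURCE B (Python) =====
-- def count_certain_number_in_list(list_to_manipulate, certain_number):
--     index_list = []
--     rest = list_to_manipulate
--     offset = 0
--     while True:
--         try:
--             pos = rest.index(certain_number)
--         except ValueError:
--             break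
--         index_list.append(offset + pos)
--         rest = rest[pos + 1:]
--         offset = offset + pos + 1
--     return len(index_list), index_list
-- ===== Notes on version B (the rewrite author's own statement) =====
-- stated objective: alternative
-- what changed: Replaced A's index loop over range(len(xs)) maintaining a counter and an index list with a repeated first-occurrence search: a while loop that calls list.index on the remaining suffix, slices past each hit, and derives the count as len(index_list).
import Mathlib
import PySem

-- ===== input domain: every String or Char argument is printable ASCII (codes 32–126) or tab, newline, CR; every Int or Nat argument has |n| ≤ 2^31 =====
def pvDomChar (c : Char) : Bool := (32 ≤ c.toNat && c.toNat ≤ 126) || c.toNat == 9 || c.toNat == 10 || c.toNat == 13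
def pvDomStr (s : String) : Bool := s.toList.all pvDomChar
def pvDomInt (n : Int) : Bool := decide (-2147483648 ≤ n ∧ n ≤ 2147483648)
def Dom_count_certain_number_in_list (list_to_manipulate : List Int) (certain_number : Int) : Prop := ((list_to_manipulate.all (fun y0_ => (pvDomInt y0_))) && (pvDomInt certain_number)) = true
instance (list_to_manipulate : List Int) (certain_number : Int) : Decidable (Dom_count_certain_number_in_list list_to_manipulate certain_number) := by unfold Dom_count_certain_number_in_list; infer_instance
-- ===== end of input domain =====

-- B replaces A's single counting loop with a repeated first-occurrence search (list.index on the remaining suffix, slice past each hit), the count being the length of the collected index list; same O(n) cost, different decomposition.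
-- ===== PORT A =====
-- A: one loop over range(len(xs)) maintaining (count, index_list).
def count_certain_number_in_list (list_to_manipulate : List Int) (certain_number : Int) : Int × List Int :=
  (PySem.List.pyRange 0 list_to_manipulate.length 1).foldl
    (fun (st : Int × List Int) i =>
      if certain_number == PySem.List.pyGetD list_to_manipulate i 0 then
        (st.1 + 1, st.2 ++ [i])
      else st)
    (0, [])

-- ===== PORT B =====
-- B's while loop: try rest.index(n) (none = ValueError → break), append offset+pos, drop past the hit.
def pvLocate (certain_number : Int) (xs : List Int) (offset : Int) (index_list : List Int) : List Int :=
  match h : PySem.List.index? xs certain_number with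
  | none => index_list
  | some pos =>
      pvLocate certain_number (PySem.List.slice xs (some ((pos : Int) + 1)) none)
        (offset + pos + 1) (index_list ++ [offset + (pos : Int)])
termination_by xs.length
decreasing_by
  have hp := PySem.List.getElem_of_index?_eq_some h
  obtain ⟨hk, -, -⟩ := hp
  have : PySem.List.slice xs (some ((pos : Int) + 1)) none = xs.drop (pos + 1) := by
    have := PySem.List.slice_from_natCast xs (pos + 1)
    simpa [Nat.cast_add] using this
  rw [this]
  simp [List.length_drop]; omega

def count_certain_number_in_list_alt (list_to_manipulate : List Int) (certain_number : Int) : Int × List Int :=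
  let index_list := pvLocate certain_number list_to_manipulate 0 []
  ((index_list.length : Int), index_list)

-- ===== PRECONDITION & SPEC =====
def Spec_count_certain_number_in_list (list_to_manipulate : List Int) (certain_number : Int) (out : Int × List Int) : Prop := out = count_certain_number_in_list_alt list_to_manipulate certain_number
instance (list_to_manipulate : List Int) (certain_number : Int) (out : Int × List Int) : Decidable (Spec_count_certain_number_in_list list_to_manipulate certain_number out) := by unfold Spec_count_certain_number_in_list; infer_instance

-- ===== CLAIM (what is proved, stated in full; the proofs are below) =====
def Claim_equal_count_certain_number_in_list : Prop := ∀ (list_to_manipulate : List Int) (certain_number : Int), Dom_count_certain_number_in_list list_to_manipulate certain_number → Spec_count_certain_number_in_list list_to_manipulate certain_number (count_certain_number_in_list list_to_manipulate certain_number)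

-- ===== LEMMAS AND PROOFS =====

-- A's fold over enumerated pairs: accumulates count and matching indices.
lemma pv_fold (n : Int) (l : List (Int × Int)) (c : Int) (acc : List Int) :
    l.foldl (fun (st : Int × List Int) p => if n == p.2 then (st.1 + 1, st.2 ++ [p.1]) else st) (c, acc)
      = (c + ((l.filter (fun p => p.2 == n)).length : Int),
         acc ++ (l.filter (fun p => p.2 == n)).map (fun p => p.1)) := by
  induction l generalizing c acc with
  | nil => simp
  | cons p t ih =>
    rw [List.foldl_cons]
    by_cases h : p.2 = n
    · rw [if_pos (by simp [h]), ih]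
      simp [h]
      ring
    · rw [if_neg (by simp [Ne.symm h]), ih]
      simp [h]

-- B's recursion computes exactly the matching indices of the enumeration.
lemma pv_locate_eq (n : Int) (xs : List Int) (off : Int) (acc : List Int) :
    pvLocate n xs off acc
      = acc ++ ((PySem.List.enumerate xs off).filter (fun p => p.2 == n)).map (fun p => p.1) := by
  induction hlen : xs.length using Nat.strong_induction_on generalizing xs off acc with
  | _ L ih =>
  subst hlen
  rw [pvLocate]
  split
  case _ h =>
    have hmem : n ∉ xs := (PySem.List.index?_eq_none_iff xs n).mp h
    have : (PySem.List.enumerate xs off).filter (fun p => p.2 == n) = [] := by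
      rw [List.filter_eq_nil_iff]
      intro p hp
      obtain ⟨k, hk, rfl⟩ := (PySem.List.mem_enumerate_iff _ _ _).mp hp
      simp only [beq_iff_eq]
      intro hc; exact hmem (hc ▸ List.getElem_mem hk)
    simp [this]
  case _ pos h =>
    obtain ⟨pre, suf, rfl, hlen, hnot⟩ := (PySem.List.index?_eq_some_iff _ _ _).mp h
    have hslice : PySem.List.slice (pre ++ n :: suf) (some ((pos : Int) + 1)) none
        = (pre ++ n :: suf).drop (pos + 1) := by
      have := PySem.List.slice_from_natCast (pre ++ n :: suf) (pos + 1)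
      simpa [Nat.cast_add] using this
    have hdrop : (pre ++ n :: suf).drop (pos + 1) = suf := by
      subst hlen
      have hsplit : pre ++ n :: suf = (pre ++ [n]) ++ suf := by simp
      rw [hsplit, show pre.length + 1 = (pre ++ [n]).length by simp, List.drop_left]
    have hrec := ih suf.length (by simp; omega) suf (off + pos + 1) (acc ++ [off + (pos : Int)]) rfl
    rw [hslice, hdrop, hrec]
    rw [PySem.List.enumerate_append, List.filter_append]
    have hpre : (PySem.List.enumerate pre off).filter (fun p => p.2 == n) = [] := by
      rw [List.filter_eq_nil_iff]
      intro p hp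
      obtain ⟨k, hk, rfl⟩ := (PySem.List.mem_enumerate_iff _ _ _).mp hp
      simp only [beq_iff_eq]
      intro hc; exact hnot (hc ▸ List.getElem_mem hk)
    rw [hpre, PySem.List.enumerate_cons]
    subst hlen
    simp [add_assoc]

-- ===== VERDICT (by name: the statement is the Claim_ definition above) =====
theorem count_certain_number_in_list_spec : Claim_equal_count_certain_number_in_list := by
  intro xs n _
  show _ = _
  simp only [count_certain_number_in_list, count_certain_number_in_list_alt]
  have key : List.foldl
      (fun (st : Int × List Int) i => if n == PySem.List.pyGetD xs i 0 then (st.1 + 1, st.2 ++ [i]) else st)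
      (0, []) (PySem.List.pyRange 0 (xs.length : Int) 1) =
      List.foldl (fun (st : Int × List Int) p => if n == p.2 then (st.1 + 1, st.2 ++ [p.1]) else st)
      (0, []) (PySem.List.enumerate xs 0) := by
    have he := PySem.List.enumerate_eq_map_pyRange xs 0
    simp only [PySem.List.len] at he
    rw [he, List.foldl_map]
  rw [key, pv_fold, pv_locate_eq]
  simp
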